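-- pv_equiv track=rewrite | github.com/jaim3s/Connect-K | Connect K/main.py | f1_scores
-- ===== SOURCE A (Python) =====
-- def f1_scores(n):
--     lst= []
--     for i in range(n):
--         if i < n//2:
--             lst.append(10*(i+1))
--         else:
--             lst.append(10*(n-i))
--     return lst
-- ===== SOURCE B (Python) =====
-- def f1_scores(n):
--     if n < 1:
--         return []
--     half = [10 * (i + 1) for i in range(n // 2)]
--     mid = [10 * (n - n // 2)] if n % 2 else []
--     return half + mid + half[::-1]
-- ===== Notes on version B (the rewrite author's own statement) =====
-- stated objective: alternative
-- what changed: B builds only the ascending first half and mirrors it (half + optional middle + reversed half), exploiting the palindrome shape, instead of A's per-index branch over the whole range.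
import Mathlib
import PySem

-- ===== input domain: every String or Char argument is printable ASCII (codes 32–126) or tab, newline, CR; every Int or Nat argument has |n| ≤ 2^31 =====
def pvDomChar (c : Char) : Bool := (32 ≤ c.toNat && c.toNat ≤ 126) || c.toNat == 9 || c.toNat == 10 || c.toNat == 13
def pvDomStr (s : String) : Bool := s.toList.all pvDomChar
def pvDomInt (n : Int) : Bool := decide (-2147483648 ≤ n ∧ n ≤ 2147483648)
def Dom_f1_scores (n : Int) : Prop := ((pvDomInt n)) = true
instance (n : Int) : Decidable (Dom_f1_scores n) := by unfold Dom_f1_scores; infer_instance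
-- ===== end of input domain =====

-- B builds only the ascending first half and mirrors it (half + optional middle + reversed half),
-- exploiting the palindrome shape, instead of A's per-index branch over the whole range (objective: alternative).

-- ===== PORT A =====
def f1_scores (n : Int) : List Int :=
  (PySem.List.pyRange 0 n 1).foldl
    (fun lst i =>
      if i < PySem.Int.floordiv n 2 then lst ++ [10 * (i + 1)]
      else lst ++ [10 * (n - i)]) []

-- ===== PORT B =====
-- B: mirror construction. half[::-1] is List.reverse (PySem.List.slice?_none_none_neg_one).
def f1_scores_alt (n : Int) : List Int :=
  if n < 1 then []
  else
    let half := (PySem.List.pyRange 0 (PySem.Int.floordiv n 2) 1).map (fun i => 10 * (i + 1))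
    let mid := if PySem.Int.mod n 2 ≠ 0 then [10 * (n - PySem.Int.floordiv n 2)] else []
    half ++ mid ++ half.reverse

-- ===== PRECONDITION & SPEC =====
def Spec_f1_scores (n : Int) (out : List Int) : Prop := out = f1_scores_alt n
instance (n : Int) (out : List Int) : Decidable (Spec_f1_scores n out) := by unfold Spec_f1_scores; infer_instance

-- ===== CLAIM (what is proved, stated in full; the proofs are below) =====
def Claim_equal_f1_scores : Prop := ∀ (n : Int), Dom_f1_scores n → Spec_f1_scores n (f1_scores n)

-- ===== LEMMAS AND PROOFS =====

-- ===== VERDICT (by name: the statement is the Claim_ definition above) =====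
lemma f1_fold_map (n : Int) :
    f1_scores n = (PySem.List.pyRange 0 n 1).map
      (fun i => if i < PySem.Int.floordiv n 2 then 10 * (i + 1) else 10 * (n - i)) := by
  unfold f1_scores
  have hfun : (fun (lst : List Int) (i : Int) =>
      if i < PySem.Int.floordiv n 2 then lst ++ [10 * (i + 1)]
      else lst ++ [10 * (n - i)]) =
      (fun (lst : List Int) (i : Int) =>
        lst ++ [if i < PySem.Int.floordiv n 2 then 10 * (i + 1) else 10 * (n - i)]) := by
    funext lst i; split_ifs <;> rfl
  rw [hfun, PySem.List.foldl_append_singleton_eq_map]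
  simp

lemma f1_aux (n : Int) :
    f1_scores n = f1_scores_alt n := by
  rw [f1_fold_map]
  unfold f1_scores_alt
  by_cases hn : n < 1
  · simp [hn, PySem.List.pyRange_one_eq_nil (by omega : n ≤ 0)]
  · rw [not_lt] at hn
    simp only [if_neg (by omega : ¬ n < 1)]
    have hq : PySem.Int.floordiv n 2 = n / 2 :=
      PySem.Int.floordiv_eq_ediv_of_pos (by omega)
    have hm : PySem.Int.mod n 2 = n % 2 :=
      PySem.Int.mod_eq_emod_of_pos (by omega)
    rw [hq, hm, PySem.List.pyRange_one 0 n, PySem.List.pyRange_one 0 (n / 2)]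
    simp only [Int.sub_zero, List.map_map, Function.comp_def, zero_add]
    set N := n.toNat with hN
    set H := (n / 2).toNat with hH
    set G : ℕ → ℤ := fun k => if (k : ℤ) < n / 2 then 10 * ((k : ℤ) + 1) else 10 * (n - (k : ℤ)) with hG
    set F : ℕ → ℤ := fun k => 10 * ((k : ℤ) + 1) with hF
    have hmod := Int.emod_two_eq n
    rcases (by omega : n % 2 = 0 ∨ n % 2 = 1) with hpar | hpar
    all_goals
      simp only [hpar, ne_eq, not_true_eq_false, if_false, one_ne_zero, not_false_eq_true, if_true]
    -- even case: N = H + H; odd case: N = H + 1 + H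
    · apply List.ext_getElem
      · simp; omega
      · intro j hj1 hj2
        simp only [List.getElem_map, List.getElem_range]
        simp only [List.length_map, List.length_range] at hj1
        by_cases h1 : j < H
        · rw [List.getElem_append_left (by simp; omega),
              List.getElem_append_left (by simpa using h1)]
          simp only [List.getElem_map, List.getElem_range, hG, hF]
          rw [if_pos (by omega)]
        · rw [List.getElem_append_right (by simp; omega)]
          simp only [List.append_nil, List.length_map, List.length_range, List.getElem_reverse,
            List.getElem_map, List.getElem_range, hG, hF]
          rw [if_neg (by omega)]
          have : ((H - 1 - (j - H) : ℕ) : ℤ) = 2 * (n / 2) - 1 - j := by omega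
          rw [this]; ring_nf; omega
    · apply List.ext_getElem
      · simp; omega
      · intro j hj1 hj2
        simp only [List.getElem_map, List.getElem_range]
        simp only [List.length_map, List.length_range] at hj1
        by_cases h1 : j < H
        · rw [List.getElem_append_left (by simp; omega),
              List.getElem_append_left (by simpa using h1)]
          simp only [List.getElem_map, List.getElem_range, hG, hF]
          rw [if_pos (by omega)]
        · by_cases h2 : j = H
          · rw [List.getElem_append_left (by simp; omega),
                List.getElem_append_right (by simp; omega)]
            simp only [List.length_map, List.length_range, hG]
            rw [if_neg (by omega)]
            subst h2
            simp only [List.getElem_singleton]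
            omega
          · rw [List.getElem_append_right (by simp; omega)]
            simp only [List.length_append, List.length_map, List.length_range,
              List.length_singleton, List.getElem_reverse,
              List.getElem_map, List.getElem_range, hG, hF]
            rw [if_neg (by omega)]
            have : ((H - 1 - (j - (H + 1)) : ℕ) : ℤ) = 2 * (n / 2) - j := by omega
            rw [this]; ring_nf; omega

theorem f1_scores_spec : Claim_equal_f1_scores := by
  intro n _
  exact f1_aux n
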